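-- pv_equiv track=rewrite | github.com/0R0ZC021/SISTEMASEXP_21310158 | SISTEMA2.py | imprimir_tabla_atomos
-- ===== SOURCE A (Python) =====
-- from itertools import product
--
-- def imprimir_tabla_atomos(mapeo):
--     proposiciones = list(mapeo.values())
--     n = len(proposiciones)
--     combinaciones = list(product([True, False], repeat=n))
--     header = " | ".join(proposiciones)
--     output = f"Tabla de átomos:\n{header}\n" + "-" * len(header) + "\n"
--
--     for combinacion in combinaciones:
--         valores = ["V" if v else "F" for v in combinacion]
--         output += " | ".join(valores) + "\n"
--
--     return output
-- ===== SOURCE B (Python) =====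
-- def imprimir_tabla_atomos(mapeo):
--     proposiciones = list(mapeo.values())
--     header = " | ".join(proposiciones)
--     lines = ["Tabla de átomos:", header, "-" * len(header)]
--     rows = [""]
--     for _ in proposiciones:
--         rows = [v + (" | " + r if r else r) for v in ("V", "F") for r in rows]
--     lines.extend(rows)
--     return "\n".join(lines) + "\n"
-- ===== Notes on version B (the rewrite author's own statement) =====
-- stated objective: alternative
-- what changed: Replaces itertools.product over boolean tuples by iterative doubling of finished row strings (prepend 'V'/'F' to every shorter row once per atom) and builds the output by a single '\n'.join of header lines plus rows instead of per-row += concatenation.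
import Mathlib
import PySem

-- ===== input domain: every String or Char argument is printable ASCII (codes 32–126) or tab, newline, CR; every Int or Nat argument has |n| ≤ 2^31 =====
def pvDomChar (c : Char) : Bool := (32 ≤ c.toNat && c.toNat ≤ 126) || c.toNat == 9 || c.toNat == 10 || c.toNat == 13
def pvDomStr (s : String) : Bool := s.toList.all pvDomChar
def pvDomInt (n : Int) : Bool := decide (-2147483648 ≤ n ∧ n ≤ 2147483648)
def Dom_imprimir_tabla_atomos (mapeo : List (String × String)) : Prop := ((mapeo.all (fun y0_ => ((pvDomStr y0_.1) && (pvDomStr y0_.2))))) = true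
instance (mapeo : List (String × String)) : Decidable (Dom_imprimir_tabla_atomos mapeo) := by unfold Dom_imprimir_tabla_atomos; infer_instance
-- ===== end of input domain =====

-- B drops itertools.product entirely: it grows the list of finished row STRINGS by
-- doubling (prepend "V"/"F" to every shorter row) and assembles the output by one
-- final "\n".join — alternative decomposition, same cost.

-- ===== PORT A =====
-- itertools.product([True, False], repeat=n): first factor varies slowest, True before False
def pvProduct2 : Nat → List (List Bool)
  | 0 => [[]]
  | n + 1 => [true, false].flatMap (fun b => (pvProduct2 n).map (b :: ·))

def imprimir_tabla_atomos (mapeo : List (String × String)) : String :=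
  let proposiciones := (PySem.Dict.ofList mapeo).values
  let n := proposiciones.length
  let combinaciones := pvProduct2 n
  let header := PySem.Str.join " | " proposiciones
  let output := "Tabla de átomos:\n" ++ header ++ "\n"
      ++ String.ofList (PySem.List.pyRepeat ['-'] (PySem.Str.len header)) ++ "\n"
  combinaciones.foldl
    (fun out combinacion =>
      out ++ PySem.Str.join " | " (combinacion.map (fun v => if v then "V" else "F")) ++ "\n")
    output

-- ===== PORT B =====
-- one doubling step of Source B: rows = [v + (" | " + r if r else r) for v in ("V","F") for r in rows]
def pvDoble (rows : List String) : List String :=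
  ["V", "F"].flatMap (fun v => rows.map (fun r => v ++ (if r ≠ "" then " | " ++ r else r)))

def imprimir_tabla_atomos_alt (mapeo : List (String × String)) : String :=
  let proposiciones := (PySem.Dict.ofList mapeo).values
  let header := PySem.Str.join " | " proposiciones
  let lines := ["Tabla de átomos:", header,
      String.ofList (PySem.List.pyRepeat ['-'] (PySem.Str.len header))]
  let rows := proposiciones.foldl (fun rows _ => pvDoble rows) [""]
  PySem.Str.join "\n" (lines ++ rows) ++ "\n"

-- ===== PRECONDITION & SPEC =====
def Spec_imprimir_tabla_atomos (mapeo : List (String × String)) (out : String) : Prop := out = imprimir_tabla_atomos_alt mapeo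
instance (mapeo : List (String × String)) (out : String) : Decidable (Spec_imprimir_tabla_atomos mapeo out) := by unfold Spec_imprimir_tabla_atomos; infer_instance

-- ===== CLAIM (what is proved, stated in full; the proofs are below) =====
def Claim_equal_imprimir_tabla_atomos : Prop := ∀ (mapeo : List (String × String)), Dom_imprimir_tabla_atomos mapeo → Spec_imprimir_tabla_atomos mapeo (imprimir_tabla_atomos mapeo)

-- ===== LEMMAS AND PROOFS =====

-- A's row string for a combination
def pvRowA (c : List Bool) : String :=
  PySem.Str.join " | " (c.map (fun v => if v then "V" else "F"))

theorem pvRowA_ne_empty (b : Bool) (c : List Bool) : pvRowA (b :: c) ≠ "" := by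
  intro h
  have h' := congrArg String.toList h
  cases c with
  | nil => cases b <;> simp [pvRowA, PySem.Chars.join_singleton] at h'
  | cons b' c' =>
      rw [pvRowA] at h'
      simp only [List.map_cons, PySem.Str.toList_join, List.map_cons,
        PySem.Chars.join_cons_cons] at h'
      cases b <;> simp at h'

theorem pvRowA_cons (b : Bool) (c : List Bool) :
    pvRowA (b :: c) = (if b then "V" else "F")
      ++ (if pvRowA c ≠ "" then " | " ++ pvRowA c else pvRowA c) := by
  cases c with
  | nil =>
      have : pvRowA ([] : List Bool) = "" := by decide
      rw [this]
      simp only [ne_eq, not_true_eq_false, if_false]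
      apply String.toList_inj.mp
      cases b <;> simp [pvRowA, PySem.Chars.join_singleton]
  | cons b' c' =>
      rw [if_pos (pvRowA_ne_empty b' c')]
      apply String.toList_inj.mp
      simp only [pvRowA, List.map_cons, PySem.Str.toList_join, List.map_cons,
        PySem.Chars.join_cons_cons, String.toList_append]
      cases b <;> simp

-- B's doubling step produces exactly A's rows for one more atom
theorem pvDoble_rows (n : Nat) :
    pvDoble ((pvProduct2 n).map pvRowA) = (pvProduct2 (n + 1)).map pvRowA := by
  simp only [pvDoble, pvProduct2, List.flatMap_cons, List.flatMap_nil, List.append_nil,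
    List.map_append, List.map_map]
  congr 1 <;> (apply List.map_congr_left; intro c _; simp only [Function.comp_apply]; rw [pvRowA_cons]) <;> simp

-- B's fold over the atom list builds A's rows for n = length
theorem pvFoldDoble (l : List String) (n : Nat) :
    l.foldl (fun rows _ => pvDoble rows) ((pvProduct2 n).map pvRowA)
      = (pvProduct2 (n + l.length)).map pvRowA := by
  induction l generalizing n with
  | nil => simp
  | cons x xs ih =>
      simp only [List.foldl_cons, pvDoble_rows n, List.length_cons]
      rw [ih (n + 1)]
      congr 2
      omega

theorem pvRows_init : ([""] : List String) = (pvProduct2 0).map pvRowA := by decide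

-- "\n".join(rows) + "\n"  versus  appending row + "\n" per row, at the char-list level
theorem pvJoin_rows (x : List Char) (xs : List (List Char)) :
    PySem.Chars.join ['\n'] (x :: xs) ++ ['\n']
      = x ++ ['\n'] ++ (xs.map (· ++ ['\n'])).flatten := by
  induction xs generalizing x with
  | nil => simp [PySem.Chars.join_singleton]
  | cons y ys ih =>
      rw [PySem.Chars.join_cons_cons]
      simp only [List.append_assoc]
      rw [ih y]
      simp

theorem pvFoldAppend (rows : List (List Bool)) (init : String) :
    (rows.foldl (fun out c =>
        out ++ PySem.Str.join " | " (c.map (fun v => if v then "V" else "F")) ++ "\n") init).toList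
      = init.toList ++ (rows.map (fun c => (pvRowA c).toList ++ ['\n'])).flatten := by
  induction rows generalizing init with
  | nil => simp
  | cons r rs ih => simp [ih, pvRowA]

-- ===== VERDICT (by name: the statement is the Claim_ definition above) =====
theorem imprimir_tabla_atomos_spec : Claim_equal_imprimir_tabla_atomos := by
  intro mapeo _
  show imprimir_tabla_atomos mapeo = imprimir_tabla_atomos_alt mapeo
  apply String.toList_inj.mp
  simp only [imprimir_tabla_atomos, imprimir_tabla_atomos_alt]
  rw [pvRows_init, pvFoldDoble _ 0]
  simp only [Nat.zero_add]
  set props := (PySem.Dict.ofList mapeo).values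
  set header := PySem.Str.join " | " props
  set dashes := String.ofList (PySem.List.pyRepeat ['-'] (PySem.Str.len header))
  rw [pvFoldAppend]
  simp only [PySem.Str.toList_join, List.map_append, List.map_cons, List.cons_append,
    String.toList_append]
  have h1 : ("\n" : String).toList = ['\n'] := rfl
  have h2 : ("Tabla de átomos:\n" : String).toList = "Tabla de átomos:".toList ++ ['\n'] := rfl
  rw [h1, h2, pvJoin_rows]
  simp [List.append_assoc]
  rfl
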